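-- pv_equiv track=rewrite | github.com/Stallion77RepoOfficial/binfreak | binfreak/binfreak/analysis/control_flow_analyzer.py | _estimate_parameters
-- ===== SOURCE A (Python) =====
-- from typing import Dict, Any, List
--
-- def _estimate_parameters(instructions: List[Dict[str, Any]], call_address: str) -> str:
--     """Estimate function parameters based on nearby instructions"""
--     try:
--         # Find instructions before the call
--         call_idx = next(i for i, instr in enumerate(instructions)
--                       if instr.get('address') == call_address)
--
--         param_count = 0
--         stack_adjustments = 0
--
--         # Look at previous 10 instructions
--         for i in range(max(0, call_idx - 10), call_idx):
--             instr = instructions[i]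
--             mnemonic = instr.get('mnemonic', '').lower()
--
--             # Count push instructions (parameter passing)
--             if mnemonic == 'push':
--                 param_count += 1
--             elif mnemonic == 'mov' and 'esp' in str(instr.get('operands', [])):
--                 stack_adjustments += 1
--
--         if param_count > 0:
--             return f"{param_count} parameters (estimated)"
--         elif stack_adjustments > 0:
--             return f"stack-based parameters"
--         else:
--             return "no parameters detected"
--
--     except (StopIteration, ValueError, IndexError):
--         return "unknown"
-- ===== SOURCE B (Python) =====
-- from collections import deque
-- from typing import Dict, Any, List
--
-- def _estimate_parameters(instructions: List[Dict[str, Any]], call_address: str) -> str: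
--     """Estimate function parameters: one forward pass keeping a deque of the last 10 instructions."""
--     window = deque(maxlen=10)
--     for instr in instructions:
--         if instr.get('address') == call_address:
--             pushes = sum(1 for ins in window
--                          if ins.get('mnemonic', '').lower() == 'push')
--             if pushes > 0:
--                 return f"{pushes} parameters (estimated)"
--             if any(ins.get('mnemonic', '').lower() == 'mov'
--                    and 'esp' in str(ins.get('operands', []))
--                    for ins in window):
--                 return "stack-based parameters"
--             return "no parameters detected"
--         window.append(instr)
--     return "unknown"
-- ===== Notes on version B (the rewrite author's own statement) =====
-- stated objective: idiomatic
-- what changed: B replaces A's enumerate+next index search followed by an index-arithmetic re-scan of instructions[max(0,idx-10):idx] with a single forward pass that maintains a collections.deque(maxlen=10) of previously seen instructions and judges the window at the first address match.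
import Mathlib
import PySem

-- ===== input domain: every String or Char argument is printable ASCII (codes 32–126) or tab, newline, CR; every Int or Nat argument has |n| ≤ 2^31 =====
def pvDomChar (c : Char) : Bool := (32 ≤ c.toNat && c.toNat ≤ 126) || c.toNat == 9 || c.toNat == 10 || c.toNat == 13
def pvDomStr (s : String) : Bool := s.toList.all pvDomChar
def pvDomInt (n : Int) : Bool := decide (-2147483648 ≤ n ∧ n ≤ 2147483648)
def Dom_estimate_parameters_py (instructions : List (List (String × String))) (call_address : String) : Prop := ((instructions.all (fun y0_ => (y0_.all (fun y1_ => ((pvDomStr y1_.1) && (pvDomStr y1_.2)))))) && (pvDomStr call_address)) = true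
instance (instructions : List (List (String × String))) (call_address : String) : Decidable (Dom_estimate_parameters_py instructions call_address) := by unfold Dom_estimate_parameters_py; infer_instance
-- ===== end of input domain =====

-- B replaces A's index search (enumerate + next) plus index-arithmetic re-scan of instructions[max(0,idx-10):idx]
-- with a single forward pass that maintains a deque(maxlen=10) of previously seen instructions (objective: idiomatic).

-- shared dict primitives: d.get(k) / d.get(k, default) as first-match association-list lookup
def epGet (d : List (String × String)) (k : String) : Option String :=
  (d.find? (fun p => p.1 == k)).map (·.2)

def epGetD (d : List (String × String)) (k : String) (dflt : String) : String :=
  (epGet d k).getD dflt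

-- shared instruction predicates (identical text in both Pythons)
def epMnem (ins : List (String × String)) : String :=
  PySem.Str.lower (epGetD ins "mnemonic" "")

def epPush (ins : List (String × String)) : Bool := epMnem ins == "push"

-- str(instr.get('operands', [])) : the value is a string (returned as-is), the default [] prints as "[]"
def epMovEsp (ins : List (String × String)) : Bool :=
  epMnem ins == "mov" && PySem.Str.isIn "esp" (epGetD ins "operands" "[]")

-- ===== PORT A =====
-- the loop body of A: count a push, else a mov touching esp
def epStep (st : Int × Int) (instr : List (String × String)) : Int × Int :=
  let mnemonic := epMnem instr
  if mnemonic == "push" then (st.1 + 1, st.2)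
  else if mnemonic == "mov" && PySem.Str.isIn "esp" (epGetD instr "operands" "[]") then (st.1, st.2 + 1)
  else st

-- A after the call index is found: for i in range(max(0, call_idx-10), call_idx) over instructions[i],
-- then the three-way verdict (instructions[i] is always in range here: 0 ≤ i < call_idx ≤ len)
def epAfter (instructions : List (List (String × String))) (call_idx : Int) : String :=
  let st := (PySem.List.pyRange (max 0 (call_idx - 10)) call_idx 1).foldl
    (fun st i => epStep st (PySem.List.pyGetD instructions i [])) (0, 0)
  if st.1 > 0 then PySem.Int.toStr st.1 ++ " parameters (estimated)"
  else if st.2 > 0 then "stack-based parameters"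
  else "no parameters detected"

def estimate_parameters_py (instructions : List (List (String × String))) (call_address : String) : String :=
  -- next(i for i, instr in enumerate(instructions) if instr.get('address') == call_address)
  match (PySem.List.enumerate instructions).find?
      (fun p => epGet p.2 "address" == some call_address) with
  | none => "unknown"  -- StopIteration
  | some p => epAfter instructions p.1

-- ===== PORT B =====
-- deque(maxlen=10).append: drop the oldest element when full
def epWindowAppend (w : List (List (String × String))) (x : List (String × String)) :
    List (List (String × String)) :=
  if w.length = 10 then w.drop 1 ++ [x] else w ++ [x]

-- the verdict computed from the window at the matching instruction
def epVerdict (w : List (List (String × String))) : String :=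
  let pushes := w.countP epPush          -- sum(1 for ins in window if …)
  if pushes > 0 then PySem.Int.toStr (pushes : Int) ++ " parameters (estimated)"
  else if w.any epMovEsp then "stack-based parameters"
  else "no parameters detected"

-- the forward pass: test for the call address first, append to the window otherwise
def epScan (call_address : String) (w : List (List (String × String))) :
    List (List (String × String)) → String
  | [] => "unknown"
  | instr :: rest =>
    if epGet instr "address" == some call_address then epVerdict w
    else epScan call_address (epWindowAppend w instr) rest

def estimate_parameters_py_alt (instructions : List (List (String × String))) (call_address : String) : String :=
  epScan call_address [] instructions

-- ===== PRECONDITION & SPEC =====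
def Spec_estimate_parameters_py (instructions : List (List (String × String))) (call_address : String) (out : String) : Prop := out = estimate_parameters_py_alt instructions call_address
instance (instructions : List (List (String × String))) (call_address : String) (out : String) : Decidable (Spec_estimate_parameters_py instructions call_address out) := by unfold Spec_estimate_parameters_py; infer_instance

-- ===== CLAIM (what is proved, stated in full; the proofs are below) =====
def Claim_equal_estimate_parameters_py : Prop := ∀ (instructions : List (List (String × String))) (call_address : String), Dom_estimate_parameters_py instructions call_address → Spec_estimate_parameters_py instructions call_address (estimate_parameters_py instructions call_address)

-- ===== LEMMAS AND PROOFS =====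

-- push and mov/esp are mutually exclusive (a mnemonic cannot equal both strings)
lemma epPush_movEsp (ins : List (String × String)) (h : epPush ins = true) :
    epMovEsp ins = false := by
  simp only [epPush, beq_iff_eq] at h
  simp [epMovEsp, h]

-- A's paired counters are the two counts over the window list
lemma epFold_count (w : List (List (String × String))) : ∀ (a b : Int),
    w.foldl epStep (a, b) = (a + (w.countP epPush : Int), b + (w.countP epMovEsp : Int)) := by
  have hstep : ∀ (st : Int × Int) x, epStep st x =
      if epPush x then (st.1 + 1, st.2)
      else if epMovEsp x then (st.1, st.2 + 1) else st := fun _ _ => rfl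
  induction w with
  | nil => intro a b; simp
  | cons x w ih =>
    intro a b
    by_cases hp : epPush x = true
    · have hm := epPush_movEsp x hp
      simp [List.foldl_cons, hstep, hp, hm, ih]
      omega
    · by_cases hm : epMovEsp x = true
      · simp [List.foldl_cons, hstep, hp, hm, ih]
        omega
      · simp [List.foldl_cons, hstep, hp, hm, ih]

-- A's index loop over range(a, b, 1) reads exactly (xs.take b).drop a
lemma epRange_fold {α : Type} (xs : List (List (String × String)))
    (f : α → List (String × String) → α) :
    ∀ (k : Nat) (a b : Int) (init : α), 0 ≤ a → a ≤ b → b ≤ xs.length → k = (b - a).toNat →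
    (PySem.List.pyRange a b 1).foldl (fun st i => f st (PySem.List.pyGetD xs i [])) init
      = ((xs.take b.toNat).drop a.toNat).foldl f init := by
  intro k
  induction k with
  | zero =>
    intro a b init ha hab hb hk
    have hba : b ≤ a := by omega
    rw [PySem.List.pyRange_one_eq_nil hba]
    have : (xs.take b.toNat).length ≤ a.toNat := by
      simp [List.length_take]; omega
    rw [List.drop_eq_nil_of_le this]
    rfl
  | succ k ih =>
    intro a b init ha hab hb hk
    obtain ⟨n, rfl⟩ : ∃ m : Nat, a = (m : Int) := ⟨a.toNat, by omega⟩
    have hlt : (n : Int) < b := by omega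
    have han : n < xs.length := by omega
    rw [PySem.List.pyRange_one_cons hlt, List.foldl_cons]
    have hget : PySem.List.pyGetD xs (n : Int) [] = xs[n] := by
      rw [PySem.List.pyGetD_natCast, List.getD_eq_getElem xs [] han]
    simp only [Int.toNat_natCast, hget]
    have hlen2 : n < (xs.take b.toNat).length := by
      simp [List.length_take]; omega
    rw [List.drop_eq_getElem_cons hlen2, List.foldl_cons, List.getElem_take]
    rw [ih ((n : Int) + 1) b (f init xs[n]) (by omega) (by omega) hb (by omega)]
    have : ((n : Int) + 1).toNat = n + 1 := by omega
    rw [this]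

-- A after the call index equals the verdict on the window of the previous ≤ 10 instructions
lemma epAfter_eq (xs : List (List (String × String))) (i : Int)
    (h0 : 0 ≤ i) (hle : i ≤ xs.length) :
    epAfter xs i = epVerdict ((xs.take i.toNat).drop (i.toNat - 10)) := by
  unfold epAfter
  rw [epRange_fold xs epStep ((i - max 0 (i - 10)).toNat) (max 0 (i - 10)) i (0, 0)
      (by omega) (by omega) hle rfl]
  have hmax : (max 0 (i - 10)).toNat = i.toNat - 10 := by omega
  rw [hmax, epFold_count]
  set w := (xs.take i.toNat).drop (i.toNat - 10) with hw
  unfold epVerdict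
  simp only [zero_add, gt_iff_lt]
  by_cases hp : 0 < w.countP epPush
  · have hp' : (0 : Int) < (w.countP epPush : Int) := by exact_mod_cast hp
    rw [if_pos hp', if_pos hp]
  · have hp' : ¬ (0 : Int) < (w.countP epPush : Int) := by exact_mod_cast hp
    rw [if_neg hp', if_neg hp]
    cases hany : w.any epMovEsp with
    | true =>
      have hc : 0 < w.countP epMovEsp := by
        obtain ⟨x, hx, hpx⟩ := List.any_eq_true.mp hany
        by_contra hz
        exact (List.countP_eq_zero.mp (by omega) x hx) hpx
      have hc' : (0 : Int) < (w.countP epMovEsp : Int) := by exact_mod_cast hc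
      rw [if_pos hc', if_pos rfl]
    | false =>
      have hc : w.countP epMovEsp = 0 :=
        List.countP_eq_zero.mpr (by simpa using List.any_eq_false.mp hany)
      have hc' : ¬ (0 : Int) < (w.countP epMovEsp : Int) := by simp [hc]
      rw [if_neg hc', if_neg (by simp)]

-- B's deque after processing a prefix holds its last (at most) 10 elements
lemma epWindow_foldl (pre : List (List (String × String))) :
    pre.foldl epWindowAppend [] = pre.drop (pre.length - 10) := by
  induction pre using List.reverseRecOn with
  | nil => simp
  | append_singleton pre x ih =>
    rw [List.foldl_append, List.foldl_cons, List.foldl_nil, ih, epWindowAppend]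
    by_cases h : pre.length < 10
    · have h0 : pre.length - 10 = 0 := by omega
      rw [if_neg (by simp [h0]; omega)]
      have h1 : (pre ++ [x]).length - 10 = 0 := by simp; omega
      rw [h0, h1, List.drop_zero, List.drop_zero]
    · rw [if_pos (by simp; omega), List.drop_drop,
          List.drop_append_of_le_length (show (pre ++ [x]).length - 10 ≤ pre.length by simp)]
      have he : pre.length - 10 + 1 = (pre ++ [x]).length - 10 := by simp; omega
      rw [he]

-- the first match in dropWhile fails the predicate
lemma epDropWhile_head {α : Type} (p : α → Bool) :
    ∀ (l : List α) (m : α) (rest : List α), l.dropWhile p = m :: rest → p m = false := by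
  intro l
  induction l with
  | nil => intro m rest h; simp [List.dropWhile] at h
  | cons x l ih =>
    intro m rest h
    by_cases hx : p x = true
    · rw [List.dropWhile_cons_of_pos hx] at h
      exact ih m rest h
    · rw [List.dropWhile_cons_of_neg hx] at h
      cases h
      simpa using hx

-- scanning a list with no matching address returns "unknown"
lemma epScan_noMatch (ca : String) (xs : List (List (String × String)))
    (h : ∀ x ∈ xs, (epGet x "address" == some ca) = false) :
    ∀ w, epScan ca w xs = "unknown" := by
  induction xs with
  | nil => intro w; rfl
  | cons x xs ih =>
    intro w
    rw [epScan, h x (by simp)]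
    exact ih (fun y hy => h y (by simp [hy])) _

-- scanning past a non-matching prefix folds it into the window
lemma epScan_prefix (ca : String) (m : List (String × String))
    (rest : List (List (String × String)))
    (hm : (epGet m "address" == some ca) = true) :
    ∀ (as : List (List (String × String))) (w : List (List (String × String))),
    (∀ x ∈ as, (epGet x "address" == some ca) = false) →
    epScan ca w (as ++ m :: rest) = epVerdict (as.foldl epWindowAppend w) := by
  intro as
  induction as with
  | nil => intro w _; simp [epScan, hm]
  | cons a as ih =>
    intro w h
    rw [List.cons_append, epScan, h a (by simp)]
    simp only [Bool.false_eq_true, if_false, List.foldl_cons]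
    exact ih _ (fun y hy => h y (by simp [hy]))

-- find? over enumerate locates the first match with its index
lemma epFind_enum (ca : String) (m : List (String × String))
    (rest : List (List (String × String)))
    (hm : (epGet m "address" == some ca) = true) :
    ∀ (as : List (List (String × String))) (s : Int),
    (∀ x ∈ as, (epGet x "address" == some ca) = false) →
    (PySem.List.enumerate (as ++ m :: rest) s).find?
        (fun p => epGet p.2 "address" == some ca) = some (s + as.length, m) := by
  intro as
  induction as with
  | nil =>
    intro s _
    simp [PySem.List.enumerate_cons, hm]
  | cons a as ih =>
    intro s h
    rw [List.cons_append, PySem.List.enumerate_cons, List.find?_cons]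
    have ha := h a (by simp)
    simp only [ha]
    rw [ih (s + 1) (fun y hy => h y (by simp [hy]))]
    congr 1
    simp
    ring

-- the main equivalence
lemma ep_main (instructions : List (List (String × String))) (ca : String) :
    estimate_parameters_py instructions ca = estimate_parameters_py_alt instructions ca := by
  set p : List (String × String) → Bool := fun x => !(epGet x "address" == some ca) with hp
  have hsplit : instructions.takeWhile p ++ instructions.dropWhile p = instructions :=
    List.takeWhile_append_dropWhile
  set as := instructions.takeWhile p with has
  have hfail : ∀ x ∈ as, (epGet x "address" == some ca) = false := by
    intro x hx
    have := List.mem_takeWhile_imp hx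
    rw [hp] at this
    simpa using this
  cases hdw : instructions.dropWhile p with
  | nil =>
    have hall : ∀ x ∈ instructions, (epGet x "address" == some ca) = false := by
      intro x hx
      rw [← hsplit, hdw, List.append_nil] at hx
      exact hfail x hx
    have hfind : (PySem.List.enumerate instructions).find?
        (fun q => epGet q.2 "address" == some ca) = none := by
      rw [List.find?_eq_none]
      intro q hq
      rw [PySem.List.mem_enumerate_iff] at hq
      obtain ⟨k, hk, rfl⟩ := hq
      simp [hall _ (List.getElem_mem hk)]
    rw [estimate_parameters_py, hfind]
    rw [estimate_parameters_py_alt, epScan_noMatch ca instructions hall]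
  | cons m rest =>
    have hpm : p m = false := epDropWhile_head p instructions m rest hdw
    have hm : (epGet m "address" == some ca) = true := by
      rw [hp] at hpm
      simpa using hpm
    have hxs : instructions = as ++ m :: rest := by rw [← hsplit, hdw]
    have hfind := epFind_enum ca m rest hm as 0 hfail
    simp only [zero_add] at hfind
    rw [estimate_parameters_py, hxs, hfind]
    show epAfter (as ++ m :: rest) (as.length : Int) = _
    rw [epAfter_eq (as ++ m :: rest) (as.length : Int) (by omega) (by simp; omega)]
    have htoN : ((as.length : Int)).toNat = as.length := by omega
    rw [htoN, List.take_left]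
    rw [estimate_parameters_py_alt, epScan_prefix ca m rest hm as [] hfail,
        epWindow_foldl]

-- ===== VERDICT (by name: the statement is the Claim_ definition above) =====
theorem estimate_parameters_py_spec : Claim_equal_estimate_parameters_py := by
  intro instructions call_address _
  unfold Spec_estimate_parameters_py
  exact ep_main instructions call_address
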